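-- pv_equiv track=rewrite | github.com/pabarros/asgard-api | hollowman/filters/__init__.py | get_app_id
-- ===== SOURCE A (Python) =====
-- def get_app_id(request_path):
--     split_ = request_path.split('/')
--     api_paths = [
--         'restart',
--         'tasks',
--         'versions',
--     ]
--     locations = [split_.index(path) for path in api_paths if path in split_]
--     cut_limit = min(locations or [len(split_)])
--     # Removes every path after the app name
--     split_ = split_[:cut_limit]
--
--     # Removes evey empty path
--     split_ = [part for part in split_ if part]
--     return '/'.join(split_).replace('v2/apps', '')
-- ===== SOURCE B (Python) =====
-- def get_app_id(request_path):
--     parts = []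
--     for token in request_path.split('/'):
--         if token in ('restart', 'tasks', 'versions'):
--             break
--         if token:
--             parts.append(token)
--     return '/'.join(parts).replace('v2/apps', '')
-- ===== Notes on version B (the rewrite author's own statement) =====
-- stated objective: simpler
-- what changed: B replaces A's three .index scans + min + slice + filter passes with a single left-to-right scan that breaks at the first API keyword and collects non-empty tokens as it goes.
import Mathlib
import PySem

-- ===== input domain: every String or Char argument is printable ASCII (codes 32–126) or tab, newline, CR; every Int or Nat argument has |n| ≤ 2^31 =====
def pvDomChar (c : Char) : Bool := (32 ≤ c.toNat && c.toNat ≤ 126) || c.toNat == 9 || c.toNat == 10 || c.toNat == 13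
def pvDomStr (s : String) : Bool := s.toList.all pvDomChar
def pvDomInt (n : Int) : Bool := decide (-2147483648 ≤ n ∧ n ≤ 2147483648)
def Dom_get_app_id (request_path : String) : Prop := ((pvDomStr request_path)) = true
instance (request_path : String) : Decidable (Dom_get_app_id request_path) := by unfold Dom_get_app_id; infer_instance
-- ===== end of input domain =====

-- B fuses A's three .index scans + min + slice + filter into one early-breaking scan (objective: simpler).

-- ===== PORT A =====
def get_app_id (request_path : String) : String :=
  let split_ : List String := (PySem.Str.split? request_path "/").getD []
  let api_paths : List String := ["restart", "tasks", "versions"]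
  let locations : List Nat :=
    (api_paths.filter (fun p => split_.contains p)).map
      (fun p => (PySem.List.index? split_ p).getD 0)
  let cand : List Nat := if locations.isEmpty then [split_.length] else locations
  let cut_limit : Nat := (PySem.List.min? cand (fun x => x)).getD 0
  let split2 : List String := PySem.List.slice split_ none (some (cut_limit : Int))
  let split3 : List String := split2.filter (fun part => part != "")
  PySem.Str.replace (PySem.Str.join "/" split3) "v2/apps" ""

-- ===== PORT B =====
-- the 'for token … break' loop of Source B, as structural recursion
def pvScan : List String → List String
  | [] => []
  | t :: ts =>
    if t == "restart" || t == "tasks" || t == "versions" then []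
    else if t != "" then t :: pvScan ts
    else pvScan ts

def get_app_id_alt (request_path : String) : String :=
  let parts : List String := pvScan ((PySem.Str.split? request_path "/").getD [])
  PySem.Str.replace (PySem.Str.join "/" parts) "v2/apps" ""

-- ===== PRECONDITION & SPEC =====
def Spec_get_app_id (request_path : String) (out : String) : Prop := out = get_app_id_alt request_path
instance (request_path : String) (out : String) : Decidable (Spec_get_app_id request_path out) := by unfold Spec_get_app_id; infer_instance

-- ===== CLAIM (what is proved, stated in full; the proofs are below) =====
def Claim_equal_get_app_id : Prop := ∀ (request_path : String), Dom_get_app_id request_path → Spec_get_app_id request_path (get_app_id request_path)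

-- ===== LEMMAS AND PROOFS =====

def pvKw (t : String) : Bool := t == "restart" || t == "tasks" || t == "versions"

theorem pvKw_iff_mem (t : String) :
    pvKw t = true ↔ t ∈ (["restart", "tasks", "versions"] : List String) := by
  simp [pvKw]; tauto

-- min? over a (+1)-shifted Nat list
theorem foldl_min_succ (t : List Nat) (x : Nat) :
    List.foldl min (x + 1) (t.map (· + 1)) = List.foldl min x t + 1 := by
  induction t generalizing x with
  | nil => rfl
  | cons y ys ih => simp [List.foldl, ih]

theorem min?_map_succ (l : List Nat) :
    PySem.List.min? (l.map (· + 1)) (fun x => x)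
      = (PySem.List.min? l (fun x => x)).map (· + 1) := by
  cases l with
  | nil => rfl
  | cons x t =>
    simp [PySem.List.min?_id_cons, foldl_min_succ]

-- A's cut_limit equals the index of the first keyword token (or the length).
theorem cut_eq_findIdx (l : List String) :
    (let locations :=
        ((["restart", "tasks", "versions"] : List String).filter (fun p => l.contains p)).map
          (fun p => (PySem.List.index? l p).getD 0)
      let cand := if locations.isEmpty then [l.length] else locations
      (PySem.List.min? cand (fun x => x)).getD 0)
    = l.findIdx pvKw := by
  induction l with
  | nil =>
    decide
  | cons x xs ih =>
    by_cases hx : pvKw x = true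
    · -- x is a keyword: 0 is among the candidate indices, so the min is 0
      have hmem : x ∈ (["restart", "tasks", "versions"] : List String) := (pvKw_iff_mem x).mp hx
      simp only [List.findIdx_cons, hx, cond_true]
      -- the candidate list is nonempty and contains 0
      have h0 : (0 : Nat) ∈
          ((["restart", "tasks", "versions"] : List String).filter (fun p => (x :: xs).contains p)).map
            (fun p => (PySem.List.index? (x :: xs) p).getD 0) := by
        refine List.mem_map.mpr ⟨x, ?_, ?_⟩
        · exact List.mem_filter.mpr ⟨hmem, by simp⟩
        · rw [PySem.List.index?_cons_self]; rfl
      set locs := ((["restart", "tasks", "versions"] : List String).filter (fun p => (x :: xs).contains p)).map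
            (fun p => (PySem.List.index? (x :: xs) p).getD 0) with hlocs
      have hne : locs.isEmpty = false := by
        cases h : locs.isEmpty
        · rfl
        · exact absurd h0 (by simp [List.isEmpty_iff.mp h])
      simp only [hne, Bool.false_eq_true, if_false]
      obtain ⟨m, hm⟩ : ∃ m, PySem.List.min? locs (fun x => x) = some m := by
        cases hmq : PySem.List.min? locs (fun x => x) with
        | none =>
          exact absurd h0 (by simp [(PySem.List.min?_eq_none_iff locs (fun x => x)).mp hmq])
        | some m => exact ⟨m, rfl⟩
      have h1 := PySem.List.min?_isMin hm 0 h0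
      simp [hm, Nat.le_zero.mp h1]
    · -- x is not a keyword: everything shifts by one
      have hxne : ∀ p ∈ (["restart", "tasks", "versions"] : List String), ¬ (x = p) := by
        intro p hp he; exact hx ((pvKw_iff_mem x).mpr (he ▸ hp))
      have hfilter : ((["restart", "tasks", "versions"] : List String).filter (fun p => (x :: xs).contains p))
          = ((["restart", "tasks", "versions"] : List String).filter (fun p => xs.contains p)) := by
        apply List.filter_congr
        intro p hp
        have h1 : p ≠ x := fun he => hxne p hp he.symm
        simp [h1]
      have hmap : ((["restart", "tasks", "versions"] : List String).filter (fun p => xs.contains p)).map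
            (fun p => (PySem.List.index? (x :: xs) p).getD 0)
          = (((["restart", "tasks", "versions"] : List String).filter (fun p => xs.contains p)).map
            (fun p => (PySem.List.index? xs p).getD 0)).map (· + 1) := by
        rw [List.map_map]
        apply List.map_congr_left
        intro p hp
        have hpmem : p ∈ (["restart", "tasks", "versions"] : List String) := (List.mem_filter.mp hp).1
        have hpin : p ∈ xs := by
          have := (List.mem_filter.mp hp).2
          simpa using this
        have hne' : (x == p) = false := by simpa using hxne p hpmem
        show (PySem.List.index? (x :: xs) p).getD 0 = (PySem.List.index? xs p).getD 0 + 1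
        have hstep := PySem.List.index?_cons_of_ne (x := x) (v := p) xs (by simpa using hne')
        obtain ⟨k, hk⟩ : ∃ k, PySem.List.index? xs p = some k :=
          Option.isSome_iff_exists.mp ((PySem.List.index?_isSome_iff xs p).mpr hpin)
        rw [hstep, hk]
        rfl
      simp only [List.findIdx_cons, hx, cond_false]
      rw [hfilter, hmap]
      set inner := ((["restart", "tasks", "versions"] : List String).filter (fun p => xs.contains p)).map
            (fun p => (PySem.List.index? xs p).getD 0) with hinner
      cases hie : inner.isEmpty
      · -- nonempty: min of shifted list = min + 1
        have : (inner.map (· + 1)).isEmpty = false := by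
          simpa using hie
        simp only [this, Bool.false_eq_true, if_false, min?_map_succ]
        obtain ⟨m, hm⟩ : ∃ m, PySem.List.min? inner (fun x => x) = some m := by
          cases hmq : PySem.List.min? inner (fun x => x) with
          | none =>
            have : inner = [] := (PySem.List.min?_eq_none_iff inner (fun x => x)).mp hmq
            rw [this] at hie; simp at hie
          | some m => exact ⟨m, rfl⟩
        have ihv : m = xs.findIdx pvKw := by
          have := ih
          simp only [hie, Bool.false_eq_true, if_false] at this
          simpa [hm] using this
        simp [hm, ihv]
      · -- empty: both sides are length + 1
        have : (inner.map (· + 1)).isEmpty = true := by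
          simpa using hie
        simp only [this, if_true]
        have ihv : xs.length = xs.findIdx pvKw := by
          have := ih
          simpa [hie] using this
        simp [PySem.List.min?_id_cons, List.length_cons, ihv]

-- B's scan equals A's take-then-filter
theorem scan_eq_take_filter (l : List String) :
    pvScan l = (l.take (l.findIdx pvKw)).filter (fun part => part != "") := by
  induction l with
  | nil => rfl
  | cons x xs ih =>
    by_cases hx : pvKw x = true
    · simp only [List.findIdx_cons, hx, cond_true, List.take_zero, List.filter_nil]
      unfold pvScan
      simp only [pvKw] at hx
      simp [hx]
    · simp only [List.findIdx_cons, hx, cond_false, List.take_succ_cons, List.filter_cons]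
      unfold pvScan
      have hx' : (x == "restart" || x == "tasks" || x == "versions") = false := by
        simpa [pvKw] using hx
      rw [hx']
      simp only [Bool.false_eq_true, if_false]
      by_cases he : (x != "") = true
      · simp [he, ih]
      · simp at he
        simp [he, ih]

-- ===== VERDICT (by name: the statement is the Claim_ definition above) =====
set_option maxHeartbeats 800000 in
theorem get_app_id_spec : Claim_equal_get_app_id := by
  intro request_path _
  show get_app_id request_path = get_app_id_alt request_path
  unfold get_app_id get_app_id_alt
  simp only
  rw [scan_eq_take_filter, ← cut_eq_findIdx, PySem.List.slice_to_natCast]
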